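-- pv_equiv track=rewrite | github.com/alienix2/AppuntiMagistrale | advent_of_code/day_09/solve.py | compact_memory
-- ===== SOURCE A (Python) =====
-- def compact_memory(extended_memory):
--     result = extended_memory[:]
--     left = 0
--     right = len(result) - 1
--
--     while left < right:
--         while left < right and result[left] != ".":
--             left += 1
--         while left < right and result[right] == ".":
--             right -= 1
--         if left < right:
--             result[left], result[right] = result[right], result[left]
--             left += 1
--             right -= 1
--     return result
-- ===== SOURCE B (Python) =====
-- def compact_memory(extended_memory):
--     k = sum(1 for x in extended_memory if x != ".")
--     fillers = iter([x for x in reversed(extended_memory[k:]) if x != "."])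
--     front = [x if x != "." else next(fillers) for x in extended_memory[:k]]
--     return front + ["."] * (len(extended_memory) - k)
-- ===== Notes on version B (the rewrite author's own statement) =====
-- stated objective: alternative
-- what changed: Replaces A's in-place two-pointer swap loop with a closed-form single-direction pass: count the non-'.' entries (k), collect the fillers from the reversed tail beyond k, substitute them for the dots in the first k slots and pad the rest with dots.
import Mathlib
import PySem

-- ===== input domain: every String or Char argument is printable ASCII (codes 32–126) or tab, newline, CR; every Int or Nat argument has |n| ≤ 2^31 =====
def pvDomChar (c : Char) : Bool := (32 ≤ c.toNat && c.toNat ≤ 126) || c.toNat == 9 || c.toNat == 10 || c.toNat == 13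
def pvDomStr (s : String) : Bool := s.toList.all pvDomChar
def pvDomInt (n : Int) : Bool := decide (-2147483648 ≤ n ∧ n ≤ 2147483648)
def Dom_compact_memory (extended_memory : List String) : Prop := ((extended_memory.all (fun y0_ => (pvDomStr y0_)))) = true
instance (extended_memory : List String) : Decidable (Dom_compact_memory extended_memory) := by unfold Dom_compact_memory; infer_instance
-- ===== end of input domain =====

-- B compacts in one closed-form pass (count the files, fill prefix gaps from the reversed tail)
-- instead of A's interleaved two-pointer swapping; objective: alternative decomposition, same result.


-- ===== PORT A =====
-- `while left < right and result[left] != ".":  left += 1`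
def pvSkipLeft (result : List String) (left right : Int) : Int :=
  if _h : left < right ∧ (PySem.List.pyGet? result left).getD "" ≠ "." then
    pvSkipLeft result (left + 1) right
  else left
termination_by (right - left).toNat
decreasing_by omega

-- `while left < right and result[right] == ".":  right -= 1`
def pvSkipRight (result : List String) (left right : Int) : Int :=
  if _h : left < right ∧ (PySem.List.pyGet? result right).getD "" = "." then
    pvSkipRight result left (right - 1)
  else right
termination_by (right - left).toNat
decreasing_by omega

-- the two bounds below are needed by pvOuter's termination proof
theorem pvSkipLeft_ge (result : List String) (left right : Int) :
    left ≤ pvSkipLeft result left right := by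
  unfold pvSkipLeft
  split
  · have := pvSkipLeft_ge result (left + 1) right; omega
  · omega
termination_by (right - left).toNat
decreasing_by omega

theorem pvSkipRight_le (result : List String) (left right : Int) :
    pvSkipRight result left right ≤ right := by
  unfold pvSkipRight
  split
  · have := pvSkipRight_le result left (right - 1); omega
  · omega
termination_by (right - left).toNat
decreasing_by omega

-- the outer `while left < right:` loop of A; on every reachable state the swap indices satisfy
-- 0 ≤ l < r < len, so the `.toNat` set and `.getD ""` reads are exact (Python never wraps or raises here)
def pvOuter (result : List String) (left right : Int) : List String :=
  if _h : left < right then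
    let l := pvSkipLeft result left right
    let r := pvSkipRight result l right
    if _h2 : l < r then
      let vl := (PySem.List.pyGet? result l).getD ""
      let vr := (PySem.List.pyGet? result r).getD ""
      pvOuter ((result.set l.toNat vr).set r.toNat vl) (l + 1) (r - 1)
    else result
  else result
termination_by (right - left).toNat
decreasing_by
  have h1 := pvSkipLeft_ge result left right
  have h2 := pvSkipRight_le result (pvSkipLeft result left right) right
  omega

-- result = extended_memory[:]; left = 0; right = len(result) - 1; the loop; return result
def compact_memory (extended_memory : List String) : List String :=
  pvOuter extended_memory 0 ((extended_memory.length : Int) - 1)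

-- ===== PORT B =====
-- `[x if x != "." else next(fillers) for x in ...]`; the `[]` filler branch is Python's
-- StopIteration and is unreachable (dots in the k-prefix = number of fillers)
def pvFillPrefix : List String → List String → List String
  | [], _ => []
  | x :: xs, fs =>
    if x ≠ "." then x :: pvFillPrefix xs fs
    else match fs with
      | f :: fs' => f :: pvFillPrefix xs fs'
      | [] => []

def compact_memory_alt (extended_memory : List String) : List String :=
  -- k = sum(1 for x in extended_memory if x != ".")
  let k := extended_memory.countP (fun x => x ≠ ".")
  -- fillers = iter([x for x in reversed(extended_memory[k:]) if x != "."])   (xs[k:], 0 ≤ k: drop k)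
  let fillers := ((extended_memory.drop k).reverse).filter (fun x => x ≠ ".")
  -- front = [x if x != "." else next(fillers) for x in extended_memory[:k]]
  let front := pvFillPrefix (extended_memory.take k) fillers
  -- front + ["."] * (len(extended_memory) - k)
  front ++ List.replicate (extended_memory.length - k) "."

-- ===== PRECONDITION & SPEC =====
def Spec_compact_memory (extended_memory : List String) (out : List String) : Prop := out = compact_memory_alt extended_memory
instance (extended_memory : List String) (out : List String) : Decidable (Spec_compact_memory extended_memory out) := by unfold Spec_compact_memory; infer_instance

-- ===== CLAIM (what is proved, stated in full; the proofs are below) =====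
def Claim_equal_compact_memory : Prop := ∀ (extended_memory : List String), Dom_compact_memory extended_memory → Spec_compact_memory extended_memory (compact_memory extended_memory)

-- ===== LEMMAS AND PROOFS =====

theorem alt_nil : compact_memory_alt [] = [] := by decide

theorem alt_single (a : String) : compact_memory_alt [a] = [a] := by
  by_cases h : a = "."
  · subst h; decide
  · simp [compact_memory_alt, pvFillPrefix, h]

theorem alt_cons (a : String) (xs : List String) (h : a ≠ ".") :
    compact_memory_alt (a :: xs) = a :: compact_memory_alt xs := by
  have hk : (a :: xs).countP (fun x => !decide (x = ".")) = xs.countP (fun x => !decide (x = ".")) + 1 :=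
    List.countP_cons_of_pos (by simp [h])
  simp [compact_memory_alt, hk, pvFillPrefix, h]

theorem alt_snoc_dot (xs : List String) :
    compact_memory_alt (xs ++ ["."]) = compact_memory_alt xs ++ ["."] := by
  have hle : xs.countP (fun x => !decide (x = ".")) ≤ xs.length := List.countP_le_length
  have hk : (xs ++ ["."]).countP (fun x => !decide (x = ".")) = xs.countP (fun x => !decide (x = ".")) := by
    simp [List.countP_append]
  simp [compact_memory_alt, hk, List.take_append_of_le_length hle,
        List.drop_append_of_le_length hle, Nat.succ_sub hle, List.replicate_succ']

theorem alt_swap (xs : List String) (b : String) (h : b ≠ ".") :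
    compact_memory_alt ("." :: (xs ++ [b])) = b :: compact_memory_alt xs ++ ["."] := by
  have hle : xs.countP (fun x => !decide (x = ".")) ≤ xs.length := List.countP_le_length
  have hk : ("." :: (xs ++ [b])).countP (fun x => !decide (x = ".")) = xs.countP (fun x => !decide (x = ".")) + 1 := by
    rw [List.countP_cons_of_neg (by simp), List.countP_append]; simp [h]
  simp [compact_memory_alt, hk, List.take_append_of_le_length hle,
        List.drop_append_of_le_length hle, pvFillPrefix, h,
        Nat.succ_sub hle, List.replicate_succ']

theorem outer_step_left (result : List String) (left right : Int)
    (h1 : left < right) (h2 : (PySem.List.pyGet? result left).getD "" ≠ ".") :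
    pvOuter result left right = pvOuter result (left + 1) right := by
  have hsl : pvSkipLeft result left right = pvSkipLeft result (left + 1) right := by
    rw [pvSkipLeft]; rw [dif_pos ⟨h1, h2⟩]
  by_cases h3 : left + 1 < right
  · rw [pvOuter, dif_pos h1]
    conv_rhs => rw [pvOuter, dif_pos h3]
    simp only [hsl]
  · have e1 : pvSkipLeft result (left + 1) right = left + 1 := by
      rw [pvSkipLeft, dif_neg (fun hc => absurd hc.1 (by omega))]
    have e2 : pvSkipRight result (left + 1) right = right := by
      rw [pvSkipRight, dif_neg (fun hc => absurd hc.1 (by omega))]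
    rw [pvOuter, dif_pos h1]
    conv_rhs => rw [pvOuter, dif_neg h3]
    simp only [hsl, e1, e2]
    rw [dif_neg (by omega)]

theorem outer_step_right (result : List String) (left right : Int)
    (h1 : left < right) (hL : (PySem.List.pyGet? result left).getD "" = ".")
    (hR : (PySem.List.pyGet? result right).getD "" = ".") :
    pvOuter result left right = pvOuter result left (right - 1) := by
  have hsl : pvSkipLeft result left right = left := by
    rw [pvSkipLeft, dif_neg (fun hc => absurd hL hc.2)]
  have hsr : pvSkipRight result left right = pvSkipRight result left (right - 1) := by
    rw [pvSkipRight]; rw [dif_pos ⟨h1, hR⟩]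
  by_cases h3 : left < right - 1
  · have hsl2 : pvSkipLeft result left (right - 1) = left := by
      rw [pvSkipLeft, dif_neg (fun hc => absurd hL hc.2)]
    rw [pvOuter, dif_pos h1]
    conv_rhs => rw [pvOuter, dif_pos h3]
    simp only [hsl, hsl2, hsr]
  · have e2 : pvSkipRight result left (right - 1) = right - 1 := by
      rw [pvSkipRight, dif_neg (fun hc => absurd hc.1 (by omega))]
    rw [pvOuter, dif_pos h1]
    conv_rhs => rw [pvOuter, dif_neg h3]
    simp only [hsl, hsr, e2]
    rw [dif_neg (by omega)]

theorem outer_step_swap (result : List String) (left right : Int)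
    (h1 : left < right) (hL : (PySem.List.pyGet? result left).getD "" = ".")
    (hR : (PySem.List.pyGet? result right).getD "" ≠ ".") :
    pvOuter result left right =
      pvOuter ((result.set left.toNat ((PySem.List.pyGet? result right).getD "")).set
                 right.toNat ((PySem.List.pyGet? result left).getD ""))
        (left + 1) (right - 1) := by
  have hsl : pvSkipLeft result left right = left := by
    rw [pvSkipLeft, dif_neg (fun hc => absurd hL hc.2)]
  have hsr : pvSkipRight result left right = right := by
    rw [pvSkipRight, dif_neg (fun hc => absurd hc.2 hR)]
  rw [pvOuter, dif_pos h1]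
  simp only [hsl, hsr]
  rw [dif_pos h1]

-- the frame lemma: A's loop on l ++ seg ++ r with the pointers spanning seg compacts exactly seg, B-style
theorem outer_frame (n : Nat) (seg l r : List String) (hn : seg.length = n) :
    pvOuter (l ++ seg ++ r) (l.length : Int) ((l.length : Int) + (n : Int) - 1)
      = l ++ compact_memory_alt seg ++ r := by
  induction n using Nat.strong_induction_on generalizing seg l r with
  | _ n IH =>
  match n, hn with
  | 0, hn =>
    have hseg : seg = [] := List.length_eq_zero_iff.mp hn
    subst hseg
    rw [pvOuter, dif_neg (by push_cast; omega)]
    simp [alt_nil]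
  | 1, hn =>
    obtain ⟨a, hseg⟩ := List.length_eq_one_iff.mp hn
    subst hseg
    rw [pvOuter, dif_neg (by push_cast; omega)]
    simp [alt_single]
  | (m + 2), hn =>
    obtain ⟨a, t, hseg⟩ : ∃ a t, seg = a :: t := by
      cases seg with
      | nil => simp at hn
      | cons a t => exact ⟨a, t, rfl⟩
    subst hseg
    have ht : t.length = m + 1 := by simpa using hn
    have htne : t ≠ [] := by intro h; simp [h] at ht
    obtain ⟨ys, b, hys⟩ : ∃ ys b, t = ys ++ [b] := ⟨t.dropLast, t.getLast htne, (List.dropLast_append_getLast htne).symm⟩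
    have hysl : ys.length = m := by
      have := ht; rw [hys] at this; simpa using this
    by_cases ha : a = "."
    · subst ha
      by_cases hb : b = "."
      · -- trailing "." : step right, recurse on seg.dropLast
        subst hb
        have hL : (PySem.List.pyGet? (l ++ ("." :: t) ++ r) (l.length : Int)).getD "" = "." := by
          rw [List.append_assoc, List.cons_append, PySem.List.pyGet?_append_length]; rfl
        have hR : (PySem.List.pyGet? (l ++ ("." :: t) ++ r) ((l.length : Int) + ((m + 2 : Nat) : Int) - 1)).getD "" = "." := by
          have hre : l ++ ("." :: t) ++ r = (l ++ "." :: ys) ++ "." :: r := by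
            simp [hys]
          have hidx : ((l.length : Int) + ((m + 2 : Nat) : Int) - 1) = ((l ++ "." :: ys).length : Int) := by
            simp [hysl]; ring
          rw [hre, hidx, PySem.List.pyGet?_append_length]; rfl
        rw [outer_step_right _ _ _ (by omega) hL hR]
        have hre : l ++ "." :: t ++ r = l ++ ("." :: ys) ++ ("." :: r) := by simp [hys]
        have hidx : (l.length : Int) + ((m + 2 : Nat) : Int) - 1 - 1
            = (l.length : Int) + ((m + 1 : Nat) : Int) - 1 := by push_cast; ring
        rw [hre, hidx, IH (m + 1) (by omega) _ _ _ (by simp [hysl])]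
        rw [hys, ← List.cons_append, alt_snoc_dot]
        simp
      · -- head "." and last b ≠ "." : swap, recurse on the middle
        have hL : (PySem.List.pyGet? (l ++ ("." :: t) ++ r) (l.length : Int)).getD "" = "." := by
          rw [List.append_assoc, List.cons_append, PySem.List.pyGet?_append_length]; rfl
        have hre : l ++ ("." :: t) ++ r = (l ++ "." :: ys) ++ b :: r := by simp [hys]
        have hidx : ((l.length : Int) + ((m + 2 : Nat) : Int) - 1) = ((l ++ "." :: ys).length : Int) := by
          simp [hysl]; ring
        have hRv : (PySem.List.pyGet? (l ++ ("." :: t) ++ r) ((l.length : Int) + ((m + 2 : Nat) : Int) - 1)).getD "" = b := by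
          rw [hre, hidx, PySem.List.pyGet?_append_length]; rfl
        rw [outer_step_swap _ _ _ (by push_cast; omega) hL (by rw [hRv]; exact hb), hL, hRv]
        -- the doubly-updated list, renormalised for the recursive frame
        have hset : ((l ++ "." :: t ++ r).set (l.length : Int).toNat b).set
            ((l.length : Int) + ((m + 2 : Nat) : Int) - 1).toNat "."
            = (l ++ [b]) ++ ys ++ ("." :: r) := by
          have h1 : ((l ++ "." :: t ++ r).set (l.length : Int).toNat b)
              = (l ++ b :: ys) ++ b :: r := by
            rw [Int.toNat_natCast, List.append_assoc, List.set_append_right _ _ (le_refl _)]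
            simp [hys]
          rw [h1]
          have h2 : ((l.length : Int) + ((m + 2 : Nat) : Int) - 1).toNat = (l ++ b :: ys).length := by
            simp [hysl]; omega
          rw [h2, List.set_append_right _ _ (le_refl _)]
          simp
        have hidx2 : (l.length : Int) + ((m + 2 : Nat) : Int) - 1 - 1
            = (((l ++ [b]).length : Int)) + ((m : Nat) : Int) - 1 := by push_cast; simp; ring
        have hidx3 : (l.length : Int) + 1 = ((l ++ [b]).length : Int) := by simp
        rw [hset, hidx2, hidx3, IH m (by omega) _ _ _ hysl]
        rw [hys, alt_swap _ _ hb]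
        simp
    · -- head a ≠ "." : step left past it
      have hA : (PySem.List.pyGet? (l ++ (a :: t) ++ r) (l.length : Int)).getD "" = a := by
        rw [List.append_assoc, List.cons_append, PySem.List.pyGet?_append_length]; rfl
      rw [outer_step_left _ _ _ (by push_cast; omega) (by rw [hA]; exact ha)]
      have hre : l ++ (a :: t) ++ r = (l ++ [a]) ++ t ++ r := by simp
      have hidx : (l.length : Int) + 1 = (((l ++ [a]).length : Int)) := by simp
      have hidx2 : (l.length : Int) + ((m + 2 : Nat) : Int) - 1
          = (((l ++ [a]).length : Int)) + ((m + 1 : Nat) : Int) - 1 := by push_cast; simp; ring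
      rw [hre, hidx, hidx2, IH (m + 1) (by omega) _ _ _ ht]
      rw [alt_cons _ _ ha]
      simp

-- ===== VERDICT (by name: the statement is the Claim_ definition above) =====
theorem compact_memory_spec : Claim_equal_compact_memory := by
  intro xs _
  unfold Spec_compact_memory compact_memory
  have h := outer_frame xs.length xs [] [] rfl
  simpa using h
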